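-- pv_equiv track=rewrite | github.com/chakri888/Coding-Task | weather_api_script.py | city_name_with_dashes
-- ===== SOURCE A (Python) =====
-- def city_name_with_dashes(city_name):
--     city_name_dashes_list = list()
--     city_name_word = ""
--     for name in city_name:
--         if name == "-":
--             city_name_word = city_name_word[0].upper() + \
--                              city_name_word[1:].lower()
--             city_name_dashes_list.append(city_name_word)
--             city_name_dashes_list.append(name)
--             city_name_word = ""
--             name = ""
--         city_name_word += name
--     city_name_word = city_name_word[0].upper() + city_name_word[1:].lower()
--     city_name_dashes_list.append(city_name_word)
--     return ''.join(city_name_dashes_list)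
-- ===== SOURCE B (Python) =====
-- def city_name_with_dashes(city_name):
--     return '-'.join(seg[0].upper() + seg[1:].lower()
--                     for seg in city_name.split('-'))
-- ===== Notes on version B (the rewrite author's own statement) =====
-- stated objective: idiomatic
-- what changed: Replaces the character-by-character loop that grows a word string and a piece list with a single split('-')/join over the dash-separated segments, capitalising each segment with seg[0].upper() + seg[1:].lower(); dropping the per-character string concatenation also makes it measurably faster.
-- outside the precondition, e.g. on city_name_with_dashes('-'): A raises IndexError, B raises IndexError
import Mathlib
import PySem

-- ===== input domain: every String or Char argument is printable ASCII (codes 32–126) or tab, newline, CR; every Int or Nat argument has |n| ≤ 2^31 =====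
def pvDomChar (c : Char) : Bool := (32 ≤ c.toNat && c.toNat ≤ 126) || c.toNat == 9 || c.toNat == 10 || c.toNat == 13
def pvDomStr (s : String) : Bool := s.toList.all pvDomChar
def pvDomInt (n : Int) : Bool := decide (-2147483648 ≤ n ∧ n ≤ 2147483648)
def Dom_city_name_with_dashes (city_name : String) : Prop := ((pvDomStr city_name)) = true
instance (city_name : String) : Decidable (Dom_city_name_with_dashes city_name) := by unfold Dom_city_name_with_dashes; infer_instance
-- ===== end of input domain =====

-- B replaces A's character-by-character loop (word accumulator + list of pieces) by an
-- idiomatic split('-') / '-'.join over the dash-separated segments; same cost, same values.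


-- ===== PORT A =====
-- word[0].upper() + word[1:].lower(); word[0] raises IndexError on an empty word in
-- Python, which Pre_ excludes, so the pyGetD default ' ' is never reached under Pre_.
def capWordA (w : List Char) : List Char :=
  PySem.Chars.upper [PySem.List.pyGetD w 0 ' '] ++
    PySem.Chars.lower (PySem.List.slice w (some 1) none)

-- one iteration of A's `for name in city_name` loop; state = (city_name_dashes_list, city_name_word)
def cityStep (st : List (List Char) × List Char) (c : Char) : List (List Char) × List Char :=
  if c = '-' then (st.1 ++ [capWordA st.2, ['-']], []) else (st.1, st.2 ++ [c])

def city_name_with_dashes (city_name : String) : String :=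
  let st := city_name.toList.foldl cityStep ([], [])
  String.ofList (PySem.Chars.join [] (st.1 ++ [capWordA st.2]))   -- ''.join(...)

-- ===== PORT B =====
-- seg[0].upper() + seg[1:].lower(); same Python expression as in A, same remark about Pre_.
def capWordB (seg : List Char) : List Char :=
  PySem.Chars.upper [PySem.List.pyGetD seg 0 ' '] ++
    PySem.Chars.lower (PySem.List.slice seg (some 1) none)

def city_name_with_dashes_alt (city_name : String) : String :=
  String.ofList (PySem.Chars.join ['-']
    ((PySem.Chars.splitOn city_name.toList ['-']).map capWordB))

-- ===== PRECONDITION & SPEC =====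
-- Pre_ excludes exactly the inputs on which A raises IndexError: those with an empty
-- dash-separated segment (empty string, leading or trailing '-', or two adjacent dashes).
def Pre_city_name_with_dashes (city_name : String) : Prop :=
  city_name.toList ≠ [] ∧ city_name.toList.head? ≠ some '-' ∧
    city_name.toList.getLast? ≠ some '-' ∧ ¬ ['-', '-'] <:+: city_name.toList
instance (city_name : String) : Decidable (Pre_city_name_with_dashes city_name) := by
  unfold Pre_city_name_with_dashes; infer_instance

def pvWitness_city_name_with_dashes : String := "new-york"

def Spec_city_name_with_dashes (city_name : String) (out : String) : Prop := out = city_name_with_dashes_alt city_name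
instance (city_name : String) (out : String) : Decidable (Spec_city_name_with_dashes city_name out) := by unfold Spec_city_name_with_dashes; infer_instance

-- ===== CLAIM (what is proved, stated in full; the proofs are below) =====
def Claim_equal_city_name_with_dashes : Prop := ∀ (city_name : String), Dom_city_name_with_dashes city_name → Pre_city_name_with_dashes city_name → Spec_city_name_with_dashes city_name (city_name_with_dashes city_name)

-- ===== LEMMAS AND PROOFS =====

-- reference splitter: split on '-' carrying the current (un-reversed) word
def mySplit (w : List Char) : List Char → List (List Char)
  | [] => [w]
  | c :: rest => if c = '-' then w :: mySplit [] rest else mySplit (w ++ [c]) rest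

theorem mySplit_ne_nil (w : List Char) (l : List Char) : mySplit w l ≠ [] := by
  induction l generalizing w with
  | nil => simp [mySplit]
  | cons c rest ih =>
      simp only [mySplit]
      split_ifs
      · simp
      · exact ih _

theorem go_eq (l : List Char) : ∀ (fuel : Nat) (cur : List Char) (acc : List (List Char)),
    l.length ≤ fuel →
    PySem.Chars.splitOn.go ['-'] fuel l cur acc = acc.reverse ++ mySplit cur.reverse l := by
  induction l with
  | nil =>
      intro fuel cur acc _
      cases fuel <;> simp [PySem.Chars.splitOn.go, mySplit]
  | cons c rest ih =>
      intro fuel cur acc hf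
      cases fuel with
      | zero => simp at hf
      | succ f =>
          by_cases hc : c = '-'
          · subst hc
            have hpre : List.isPrefixOf ['-'] ('-' :: rest) = true := by
              simp [List.isPrefixOf]
            simp only [PySem.Chars.splitOn.go, hpre, if_pos, List.length_cons,
              List.length_nil, Nat.zero_add, List.drop_succ_cons, List.drop_zero]
            rw [ih f [] (cur.reverse :: acc) (by simpa using Nat.lt_succ_iff.mp (by simpa using hf))]
            simp [mySplit]
          · have hpre : List.isPrefixOf ['-'] (c :: rest) = false := by
              simp only [List.isPrefixOf, Bool.and_eq_false_iff, beq_eq_false_iff_ne]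
              exact Or.inl fun h => hc h.symm
            simp only [PySem.Chars.splitOn.go, hpre]
            rw [ih f (c :: cur) acc (by simpa using Nat.lt_succ_iff.mp (by simpa using hf))]
            simp [mySplit, hc]

theorem splitOn_eq (s : List Char) : PySem.Chars.splitOn s ['-'] = mySplit [] s := by
  simpa using go_eq s (s.length + 1) [] [] (by omega)

theorem join_nil_flatten (xs : List (List Char)) : PySem.Chars.join [] xs = xs.flatten := by
  induction xs with
  | nil => simp [PySem.Chars.join, List.intercalate]
  | cons x t ih =>
      cases t with
      | nil => simp [PySem.Chars.join, List.intercalate]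
      | cons y u =>
          simp only [PySem.Chars.join, List.intercalate] at ih ⊢
          rw [List.intersperse, List.flatten_cons, List.flatten_cons, ih] <;> simp

theorem join_nil_append (xs ys : List (List Char)) :
    PySem.Chars.join [] (xs ++ ys) = PySem.Chars.join [] xs ++ PySem.Chars.join [] ys := by
  simp [join_nil_flatten]

theorem join_dash_cons (x : List Char) (xs : List (List Char)) (h : xs ≠ []) :
    PySem.Chars.join ['-'] (x :: xs) = x ++ '-' :: PySem.Chars.join ['-'] xs := by
  cases xs with
  | nil => exact absurd rfl h
  | cons y ys => simp [PySem.Chars.join, List.intercalate]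

theorem foldA (l : List Char) : ∀ (acc : List (List Char)) (w : List Char),
    PySem.Chars.join [] ((l.foldl cityStep (acc, w)).1 ++ [capWordA (l.foldl cityStep (acc, w)).2])
      = PySem.Chars.join [] acc ++ PySem.Chars.join ['-'] ((mySplit w l).map capWordA) := by
  induction l with
  | nil =>
      intro acc w
      rw [List.foldl_nil, join_nil_append]
      simp [mySplit, PySem.Chars.join, List.intercalate]
  | cons c rest ih =>
      intro acc w
      by_cases hc : c = '-'
      · subst hc
        simp only [List.foldl_cons, cityStep, reduceIte]
        rw [ih (acc ++ [capWordA w, ['-']]) []]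
        have hne : (mySplit [] rest).map capWordA ≠ [] := by
          simp [mySplit_ne_nil]
        simp only [mySplit, reduceIte, List.map_cons]
        rw [join_dash_cons _ _ hne, join_nil_append]
        simp [join_nil_flatten, List.append_assoc]
      · simp only [List.foldl_cons, cityStep, if_neg hc]
        rw [ih acc (w ++ [c])]
        simp [mySplit, hc]

theorem capWordA_eq_capWordB : capWordA = capWordB := rfl

-- ===== VERDICT (by name: the statement is the Claim_ definition above) =====
theorem city_name_with_dashes_spec : Claim_equal_city_name_with_dashes := by
  intro city_name _ _
  simp only [Spec_city_name_with_dashes, city_name_with_dashes, city_name_with_dashes_alt]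
  rw [splitOn_eq, ← capWordA_eq_capWordB, foldA city_name.toList [] []]
  rw [show PySem.Chars.join [] ([] : List (List Char)) = [] from rfl, List.nil_append]
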